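-- pv_equiv track=rewrite | github.com/apache/tvm | python/tvm/relay/op/strategy/arm_cpu.py | _is_simd_aligned
-- ===== SOURCE A (Python) =====
-- from functools import reduce
--
-- def _is_simd_aligned(dtype, dimensions, padding=None):
--     if padding:
--         assert len(dimensions) == len(padding)
--         padded_dims = (sum(x) for x in zip(dimensions, padding))
--     else:
--         padded_dims = dimensions
--
--     # Multiply all elements of padded_dims together. We can't use math.prod, as it
--     # does not exist in Python 3.7.
--     size = reduce(lambda x, y: x * y, padded_dims)
--     return (
--         (dtype == "int8" and size % 4 == 0)
--         or (dtype == "int16" and size % 2 == 0)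
--         or (dtype == "int32")
--     )
-- ===== SOURCE B (Python) =====
-- def _is_simd_aligned(dtype, dimensions, padding=None):
--     if padding:
--         assert len(dimensions) == len(padding)
--         dims = [d + p for d, p in zip(dimensions, padding)]
--     else:
--         dims = dimensions
--     # Alignment needs the product divisible by 2**need; instead of multiplying,
--     # count factors of two across the dimensions (capped at `need`).
--     if dtype == "int32":
--         return True
--     if dtype == "int8":
--         need = 2
--     elif dtype == "int16":
--         need = 1
--     else:
--         return False
--     twos = 0
--     for d in dims:
--         if d == 0:
--             return True
--         while twos < need and d % 2 == 0:
--             d //= 2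
--             twos += 1
--     return twos >= need
-- ===== Notes on version B (the rewrite author's own statement) =====
-- stated objective: faster
-- what changed: B never computes the product of the dimensions: it maps the dtype to a required power of two (int8 needs 2^2, int16 needs 2^1, int32 nothing) and scans the padded dimensions counting factors of two (capped at that requirement, early exit on a zero dimension); A multiplies everything into one big integer and tests size % 4 / % 2 via a chained-or.
import Mathlib
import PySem

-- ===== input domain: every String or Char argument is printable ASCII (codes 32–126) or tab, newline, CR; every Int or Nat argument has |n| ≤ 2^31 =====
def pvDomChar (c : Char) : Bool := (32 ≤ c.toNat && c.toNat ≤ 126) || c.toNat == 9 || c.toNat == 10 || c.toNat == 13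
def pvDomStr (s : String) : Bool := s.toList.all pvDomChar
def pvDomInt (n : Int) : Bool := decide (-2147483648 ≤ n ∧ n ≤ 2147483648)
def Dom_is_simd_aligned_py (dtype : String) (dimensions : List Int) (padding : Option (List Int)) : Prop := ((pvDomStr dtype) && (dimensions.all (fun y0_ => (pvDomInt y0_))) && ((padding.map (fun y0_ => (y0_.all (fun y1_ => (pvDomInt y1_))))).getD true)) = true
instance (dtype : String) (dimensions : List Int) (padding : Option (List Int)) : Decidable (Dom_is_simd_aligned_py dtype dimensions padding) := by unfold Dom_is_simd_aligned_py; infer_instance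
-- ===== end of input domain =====

-- B replaces A's product-and-mod test by counting factors of two across the dimensions (alternative algorithm).

-- ===== PORT A =====
-- Literal port of A: build padded_dims (padding truthy = some non-empty list), reduce by left fold from the head.
def is_simd_aligned_py (dtype : String) (dimensions : List Int) (padding : Option (List Int)) : Bool :=
  let padded_dims : List Int :=
    match padding with
    | some p => if p ≠ [] then (List.zip dimensions p).map (fun x => x.1 + x.2) else dimensions
    | none => dimensions
  match padded_dims with
  | [] => false  -- Python's reduce raises TypeError here; excluded by Pre_
  | h :: t =>
    let size := t.foldl (fun x y => x * y) h
    (dtype == "int8" && PySem.Int.mod size 4 == 0)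
      || (dtype == "int16" && PySem.Int.mod size 2 == 0)
      || (dtype == "int32")

-- ===== PORT B =====
-- B's inner while loop: strip factors of 2 from d, incrementing twos, capped at need.
def pvTwosOf (need twos : Nat) (d : Int) : Nat :=
  if twos < need ∧ PySem.Int.mod d 2 = 0 then
    pvTwosOf need (twos + 1) (PySem.Int.floordiv d 2)
  else twos
termination_by need - twos

-- B's for loop over the dims, with the zero-dimension early return.
def pvTwosLoop (need : Nat) (twos : Nat) : List Int → Bool
  | [] => decide (need ≤ twos)
  | d :: t => if d = 0 then true else pvTwosLoop need (pvTwosOf need twos d) t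

def is_simd_aligned_py_alt (dtype : String) (dimensions : List Int) (padding : Option (List Int)) : Bool :=
  let dims : List Int :=
    match padding with
    | some p => if p ≠ [] then (List.zip dimensions p).map (fun x => x.1 + x.2) else dimensions
    | none => dimensions
  if dtype == "int32" then true
  else if dtype == "int8" then pvTwosLoop 2 0 dims
  else if dtype == "int16" then pvTwosLoop 1 0 dims
  else false

-- ===== PRECONDITION & SPEC =====
-- Pre_ excludes exactly the inputs where A raises: empty padded_dims (reduce TypeError) and a truthy
-- padding of a different length than dimensions (AssertionError).
def Pre_is_simd_aligned_py (dtype : String) (dimensions : List Int) (padding : Option (List Int)) : Prop :=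
  dimensions ≠ [] ∧ (∀ p, padding = some p → p ≠ [] → p.length = dimensions.length)
instance (dtype : String) (dimensions : List Int) (padding : Option (List Int)) : Decidable (Pre_is_simd_aligned_py dtype dimensions padding) := by unfold Pre_is_simd_aligned_py; infer_instance
def pvWitness_is_simd_aligned_py : String × List Int × Option (List Int) := ("int16", [2, 3], some [0, 1])

def Spec_is_simd_aligned_py (dtype : String) (dimensions : List Int) (padding : Option (List Int)) (out : Bool) : Prop := out = is_simd_aligned_py_alt dtype dimensions padding
instance (dtype : String) (dimensions : List Int) (padding : Option (List Int)) (out : Bool) : Decidable (Spec_is_simd_aligned_py dtype dimensions padding out) := by unfold Spec_is_simd_aligned_py; infer_instance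

-- ===== CLAIM (what is proved, stated in full; the proofs are below) =====
def Claim_equal_is_simd_aligned_py : Prop := ∀ (dtype : String) (dimensions : List Int) (padding : Option (List Int)), Dom_is_simd_aligned_py dtype dimensions padding → Pre_is_simd_aligned_py dtype dimensions padding → Spec_is_simd_aligned_py dtype dimensions padding (is_simd_aligned_py dtype dimensions padding)

-- ===== LEMMAS AND PROOFS =====

-- an odd integer is coprime to every power of two
lemma coprime_pow_two_of_odd (need : Nat) (d : Int) (h : ¬ (2:Int) ∣ d) :
    IsCoprime ((2:Int) ^ need) d :=
  IsCoprime.pow_left ((Int.prime_two.coprime_iff_not_dvd).mpr h)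

-- the while loop preserves the divisibility question, for any cofactor m
lemma pvTwosOf_iff (need twos : Nat) (d : Int) (hd : d ≠ 0) (m : Int) :
    ((2:Int) ^ need ∣ 2 ^ twos * (d * m)) ↔ ((2:Int) ^ need ∣ 2 ^ (pvTwosOf need twos d) * m) := by
  by_cases hc : twos < need ∧ PySem.Int.mod d 2 = 0
  · obtain ⟨hlt, hmod⟩ := hc
    have hdvd : (2:Int) ∣ d := (PySem.Int.mod_eq_zero_iff_dvd d 2).mp hmod
    obtain ⟨d', rfl⟩ := hdvd
    have hfd : PySem.Int.floordiv (2 * d') 2 = d' := by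
      rw [PySem.Int.floordiv_eq_ediv_of_pos (by omega)]
      omega
    rw [pvTwosOf, if_pos ⟨hlt, hmod⟩, hfd]
    have hd' : d' ≠ 0 := by rintro rfl; simp at hd
    have heq : (2:Int) ^ twos * (2 * d' * m) = 2 ^ (twos + 1) * (d' * m) := by ring
    rw [heq]
    exact pvTwosOf_iff need (twos + 1) d' hd' m
  · rw [pvTwosOf, if_neg hc]
    rcases Classical.em (twos < need) with hlt | hge
    · -- then d is odd: strip it via coprimality
      have hodd : ¬ (2:Int) ∣ d := by
        intro h2
        exact hc ⟨hlt, (PySem.Int.mod_eq_zero_iff_dvd d 2).mpr h2⟩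
      have hcop := coprime_pow_two_of_odd need d hodd
      constructor
      · intro h
        have : (2:Int) ^ need ∣ d * (2 ^ twos * m) := by
          have : (2:Int) ^ twos * (d * m) = d * (2 ^ twos * m) := by ring
          rwa [this] at h
        exact hcop.dvd_of_dvd_mul_left this
      · intro h
        have heq : (2:Int) ^ twos * (d * m) = (2 ^ twos * m) * d := by ring
        rw [heq]
        exact h.mul_right d
    · -- twos ≥ need: both sides are true
      have hle : need ≤ twos := Nat.le_of_not_lt hge
      have hbase : (2:Int) ^ need ∣ 2 ^ twos := pow_dvd_pow 2 hle
      constructor <;> intro _ <;> exact hbase.trans (Dvd.intro _ rfl)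
termination_by need - twos
decreasing_by omega

-- the for loop computes divisibility of the product by 2^need
lemma pvTwosLoop_eq (need : Nat) (dims : List Int) : ∀ twos : Nat,
    pvTwosLoop need twos dims = decide ((2:Int) ^ need ∣ 2 ^ twos * dims.prod) := by
  induction dims with
  | nil =>
    intro twos
    simp only [pvTwosLoop, List.prod_nil, mul_one]
    refine (decide_eq_decide).mpr ?_
    constructor
    · exact fun h => pow_dvd_pow 2 h
    · intro h
      have h1 := Int.le_of_dvd (by positivity) h
      exact (pow_le_pow_iff_right₀ (by norm_num : (1:Int) < 2)).mp h1
  | cons d t ih =>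
    intro twos
    by_cases hd : d = 0
    · subst hd; simp [pvTwosLoop]
    · rw [pvTwosLoop, if_neg hd, ih]
      have := pvTwosOf_iff need twos d hd t.prod
      simp only [List.prod_cons]
      exact (decide_eq_decide).mpr this.symm

-- A's fold from the head equals the product
lemma foldl_mul_prod (h : Int) (t : List Int) :
    t.foldl (fun x y => x * y) h = (h :: t).prod := by
  induction t generalizing h with
  | nil => simp
  | cons a t ih =>
    simp only [List.foldl_cons, List.prod_cons] at *
    rw [ih]
    ring

-- A's mod test equals B's loop, per dtype need
lemma mod_test_eq_loop (k : Nat) (dims : List Int) (size : Int)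
    (hsize : size = dims.prod) :
    (PySem.Int.mod size ((2:Int) ^ k) == 0) = pvTwosLoop k 0 dims := by
  rw [pvTwosLoop_eq, hsize]
  simp only [pow_zero, one_mul]
  rw [Bool.eq_iff_iff]
  simp only [beq_iff_eq, decide_eq_true_eq]
  exact PySem.Int.mod_eq_zero_iff_dvd _ _

-- on a non-empty dims list the two ports' bodies agree
lemma core (dtype : String) (h : Int) (t : List Int) :
    ((dtype == "int8" && PySem.Int.mod (t.foldl (fun x y => x * y) h) 4 == 0)
       || (dtype == "int16" && PySem.Int.mod (t.foldl (fun x y => x * y) h) 2 == 0)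
       || (dtype == "int32"))
    = (if dtype == "int32" then true
       else if dtype == "int8" then pvTwosLoop 2 0 (h :: t)
       else if dtype == "int16" then pvTwosLoop 1 0 (h :: t)
       else false) := by
    rw [foldl_mul_prod]
    have h4 := mod_test_eq_loop 2 (h :: t) ((h :: t).prod) rfl
    have h2 := mod_test_eq_loop 1 (h :: t) ((h :: t).prod) rfl
    norm_num at h4 h2
    by_cases h32 : dtype = "int32"
    · simp [h32]
    · by_cases h8 : dtype = "int8"
      · simp [h8, h4]
      · by_cases h16 : dtype = "int16"
        · simp [h16, h2]
        · simp [h32, h8, h16]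

-- ===== VERDICT (by name: the statement is the Claim_ definition above) =====
theorem is_simd_aligned_py_spec : Claim_equal_is_simd_aligned_py := by
  intro dtype dimensions padding _ hpre
  obtain ⟨hne, hlen⟩ := hpre
  unfold Spec_is_simd_aligned_py is_simd_aligned_py is_simd_aligned_py_alt
  match padding with
  | none =>
    match dimensions, hne with
    | h :: t, _ => exact core dtype h t
  | some p =>
    by_cases hp : p = []
    · simp only [hp, ne_eq, not_true_eq_false, if_false]
      match dimensions, hne with
      | h :: t, _ => exact core dtype h t
    · simp only [hp, ne_eq, not_false_iff, if_true]
      have hnz : (List.zip dimensions p).map (fun x => x.1 + x.2) ≠ [] := by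
        intro hz
        have h1 := hlen p rfl hp
        have h2 := congrArg List.length hz
        simp [List.length_zip, h1] at h2
        exact hne h2
      obtain ⟨h, t, hL⟩ := List.exists_cons_of_ne_nil hnz
      rw [hL]
      exact core dtype h t
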